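-- pv_equiv track=rewrite | github.com/NoahBSchwartz/Syntax_Aligned_LMs | finetune_prepper/tsql_converter/utils.py | merge_similar_triplets
-- ===== SOURCE A (Python) =====
-- def merge_similar_triplets(triplets):
--     """
--     Combines JOIN conditions between same table pairs to simplify query.
--     Merging is the first step to converting a JOIN condition to TSQL.
--
--     Args: List of [table1, table2, condition] items
--     Returns: Merged triplets with combined conditions
--     """
--     merged = {}
--     for triplet in triplets:
--         pair = frozenset([triplet[0], triplet[1]])
--         identifier = triplet[2]
--         if pair in merged:
--             existing_triplet = merged[pair]
--             existing_triplet[2] = f"{existing_triplet[2]} and {identifier}"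
--         else:
--             merged[pair] = [triplet[0], triplet[1], identifier]
--     result = list(merged.values())
--     return result
-- ===== SOURCE B (Python) =====
-- def merge_similar_triplets(triplets):
--     """
--     Combines JOIN conditions between same table pairs to simplify query.
--
--     B is a two-stage group-by without any dict: stage 1 collects the distinct
--     canonical (sorted) table pairs in first-occurrence order; stage 2, for each
--     such pair, filters the whole input for its triplets and emits the first
--     triplet's table names with all its conditions joined by ' and '.
--     """
--     keys = []
--     for t in triplets:
--         k = (t[0], t[1]) if t[0] <= t[1] else (t[1], t[0])
--         if k not in keys:
--             keys.append(k)
--     result = []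
--     for k in keys:
--         matches = [t for t in triplets
--                    if ((t[0], t[1]) if t[0] <= t[1] else (t[1], t[0])) == k]
--         first = matches[0]
--         result.append([first[0], first[1], " and ".join(t[2] for t in matches)])
--     return result
-- ===== Notes on version B (the rewrite author's own statement) =====
-- stated objective: alternative
-- what changed: B drops the dict entirely: a first pass collects the distinct canonical table pairs in first-occurrence order, then for each pair a filter over the whole input gathers its triplets and ' and '.join assembles the condition, instead of A's single pass that mutates a frozenset-keyed dict of incrementally concatenated strings.
import Mathlib
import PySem

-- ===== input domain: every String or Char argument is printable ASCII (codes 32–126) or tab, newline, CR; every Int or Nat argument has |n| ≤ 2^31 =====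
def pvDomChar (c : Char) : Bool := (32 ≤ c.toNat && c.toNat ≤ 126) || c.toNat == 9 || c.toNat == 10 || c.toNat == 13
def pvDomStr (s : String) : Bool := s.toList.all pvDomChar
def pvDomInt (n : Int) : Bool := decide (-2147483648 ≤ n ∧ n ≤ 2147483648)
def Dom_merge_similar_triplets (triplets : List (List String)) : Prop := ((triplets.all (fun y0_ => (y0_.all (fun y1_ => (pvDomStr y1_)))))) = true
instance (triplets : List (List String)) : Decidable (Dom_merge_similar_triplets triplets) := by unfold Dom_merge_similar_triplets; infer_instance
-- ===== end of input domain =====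

-- B replaces A's frozenset-keyed dict of incrementally concatenated strings by a dict-free two-stage
-- group-by: collect the distinct canonical pairs in first-occurrence order, then filter-and-join per pair
-- (same return values; alternative algorithm, not claimed faster).


-- ===== PORT A =====
-- frozenset([t0, t1]) of two strings is ported as the order-canonical pair: two 2-element
-- frozensets are equal iff their canonical pairs are (exact, also when t0 = t1).
def pairKey (a b : String) : String × String := if a ≤ b then (a, b) else (b, a)

-- loop body of A: exact step-for-step transliteration (Python's in-place 'existing_triplet[2] = …'
-- is Dict.insert at an existing key, which overwrites in place).  pyGetD's defaults are never
-- reached inside Pre_ (every triplet has length ≥ 3, stored lists have length 3).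
def stepA (merged : PySem.Dict (String × String) (List String)) (triplet : List String) :
    PySem.Dict (String × String) (List String) :=
  let pair := pairKey (PySem.List.pyGetD triplet 0 "") (PySem.List.pyGetD triplet 1 "")
  let identifier := PySem.List.pyGetD triplet 2 ""
  if merged.contains pair then
    let existing := merged.getD pair []
    merged.insert pair
      (PySem.List.pySetD existing 2 (PySem.List.pyGetD existing 2 "" ++ " and " ++ identifier))
  else
    merged.insert pair
      [PySem.List.pyGetD triplet 0 "", PySem.List.pyGetD triplet 1 "", identifier]

def merge_similar_triplets (triplets : List (List String)) : List (List String) :=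
  (triplets.foldl stepA PySem.Dict.empty).values

-- ===== PORT B =====
-- Source B's canonical key '(t[0], t[1]) if t[0] <= t[1] else (t[1], t[0])'
def tripKey (t : List String) : String × String :=
  pairKey (PySem.List.pyGetD t 0 "") (PySem.List.pyGetD t 1 "")

-- stage 1 of B: distinct keys in first-occurrence order ('if k not in keys: keys.append(k)')
def keysStep (ks : List (String × String)) (t : List String) : List (String × String) :=
  if ks.contains (tripKey t) then ks else ks ++ [tripKey t]

def keysOf (triplets : List (List String)) : List (String × String) :=
  triplets.foldl keysStep []

-- stage 2 of B: filter the whole input for one pair's triplets and join the conditions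
def renderGroup (triplets : List (List String)) (k : String × String) : List String :=
  let grp := triplets.filter (fun t => tripKey t == k)
  let first := PySem.List.pyGetD grp 0 []
  [PySem.List.pyGetD first 0 "", PySem.List.pyGetD first 1 "",
   PySem.Str.join " and " (grp.map (fun t => PySem.List.pyGetD t 2 ""))]

def merge_similar_triplets_alt (triplets : List (List String)) : List (List String) :=
  (keysOf triplets).map (renderGroup triplets)

-- ===== PRECONDITION & SPEC =====
-- Pre_ excludes exactly the inputs on which Python A raises IndexError: a triplet with fewer
-- than 3 entries (B raises there too).
def Pre_merge_similar_triplets (triplets : List (List String)) : Prop :=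
  ∀ t ∈ triplets, 3 ≤ t.length
instance (triplets : List (List String)) : Decidable (Pre_merge_similar_triplets triplets) := by
  unfold Pre_merge_similar_triplets; infer_instance

def pvWitness_merge_similar_triplets : List (List String) :=
  [["a", "b", "a.id = b.id"], ["b", "a", "a.x = b.x"], ["a", "c", "a.y = c.y"]]

def Spec_merge_similar_triplets (triplets : List (List String)) (out : List (List String)) : Prop :=
  out = merge_similar_triplets_alt triplets
instance (triplets : List (List String)) (out : List (List String)) :
    Decidable (Spec_merge_similar_triplets triplets out) := by
  unfold Spec_merge_similar_triplets; infer_instance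

-- ===== CLAIM (what is proved, stated in full; the proofs are below) =====
def Claim_equal_merge_similar_triplets : Prop :=
  ∀ (triplets : List (List String)), Dom_merge_similar_triplets triplets →
    Pre_merge_similar_triplets triplets →
    Spec_merge_similar_triplets triplets (merge_similar_triplets triplets)

-- ===== LEMMAS AND PROOFS =====

lemma mem_keysStep (ks : List (String × String)) (t : List String) (k : String × String) :
    k ∈ keysStep ks t ↔ k ∈ ks ∨ k = tripKey t := by
  unfold keysStep
  split_ifs with h
  · simp only [List.contains_iff_mem] at h
    constructor
    · exact Or.inl
    · rintro (hk | rfl) <;> [exact hk; exact h]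
  · simp

lemma mem_foldl_keysStep (ts : List (List String)) :
    ∀ (ks : List (String × String)) (k : String × String),
      k ∈ ts.foldl keysStep ks ↔ k ∈ ks ∨ ∃ t ∈ ts, tripKey t = k := by
  induction ts with
  | nil => simp
  | cons t ts ih =>
    intro ks k
    simp only [List.foldl_cons, ih, mem_keysStep, List.mem_cons]
    constructor
    · rintro ((h | rfl) | ⟨u, hu, rfl⟩)
      · exact Or.inl h
      · exact Or.inr ⟨t, Or.inl rfl, rfl⟩
      · exact Or.inr ⟨u, Or.inr hu, rfl⟩
    · rintro (h | ⟨u, (rfl | hu), rfl⟩)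
      · exact Or.inl (Or.inl h)
      · exact Or.inl (Or.inr rfl)
      · exact Or.inr ⟨u, hu, rfl⟩

lemma mem_keysOf (ts : List (List String)) (k : String × String) :
    k ∈ keysOf ts ↔ ∃ t ∈ ts, tripKey t = k := by
  simp [keysOf, mem_foldl_keysStep]

lemma keysOf_snoc (ts : List (List String)) (t : List String) :
    keysOf (ts ++ [t]) = keysStep (keysOf ts) t := by
  simp [keysOf, List.foldl_append]

lemma matches_nil_of_not_mem (ts : List (List String)) (k : String × String)
    (h : k ∉ keysOf ts) : ts.filter (fun t => tripKey t == k) = [] := by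
  rw [List.filter_eq_nil_iff]
  intro t ht hk
  exact h ((mem_keysOf ts k).mpr ⟨t, ht, by simpa using hk⟩)

lemma matches_ne_nil_of_mem (ts : List (List String)) (k : String × String)
    (h : k ∈ keysOf ts) : ts.filter (fun t => tripKey t == k) ≠ [] := by
  obtain ⟨t, ht, rfl⟩ := (mem_keysOf ts k).mp h
  intro hnil
  rw [List.filter_eq_nil_iff] at hnil
  exact hnil t ht (by simp)

-- the second stage only looks at a pair's own triplets: appending a triplet of another pair changes nothing
lemma renderGroup_snoc_ne (ts : List (List String)) (t : List String) (k : String × String)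
    (h : tripKey t ≠ k) : renderGroup (ts ++ [t]) k = renderGroup ts k := by
  have hb : (tripKey t == k) = false := beq_false_of_ne h
  unfold renderGroup
  rw [List.filter_append]
  simp [List.filter, hb]

lemma pySetD_lit (a b c v : String) : PySem.List.pySetD [a, b, c] 2 v = [a, b, v] := rfl

lemma pyGetD_lit (a b c : String) : PySem.List.pyGetD [a, b, c] 2 "" = c := rfl

lemma join_and_singleton (c : String) : PySem.Str.join " and " [c] = c := by
  simp [PySem.Str.join, PySem.Chars.join, List.intercalate]

lemma intercalate_snoc (sep x : List Char) :
    ∀ (l : List (List Char)), l ≠ [] →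
      List.intercalate sep (l ++ [x]) = List.intercalate sep l ++ sep ++ x := by
  intro l hl
  induction l with
  | nil => exact absurd rfl hl
  | cons a t ih =>
    cases t with
    | nil => simp [List.intercalate, List.intersperse]
    | cons b t' =>
      have hstep : ∀ (z : List Char) (r : List (List Char)),
          List.intercalate sep (a :: z :: r) = a ++ sep ++ List.intercalate sep (z :: r) := by
        intro z r; simp [List.intercalate, List.intersperse]
      have hih := ih (by simp)
      simp only [List.cons_append] at hih ⊢
      rw [hstep, hih, hstep]
      simp [List.append_assoc]

lemma join_and_snoc (cs : List String) (h : cs ≠ []) (c : String) :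
    PySem.Str.join " and " (cs ++ [c]) = PySem.Str.join " and " cs ++ " and " ++ c := by
  apply String.toList_inj.mp
  simp only [PySem.Str.join, PySem.Chars.join, String.toList_append, String.toList_ofList,
    List.map_append, List.map_cons, List.map_nil]
  rw [intercalate_snoc _ _ _ (by simpa using h)]

-- appending a triplet of pair k extends k's group: same table names, one more joined condition
lemma renderGroup_snoc_eq (ts : List (List String)) (t : List String)
    (h : tripKey t ∈ keysOf ts) :
    renderGroup (ts ++ [t]) (tripKey t) =
      PySem.List.pySetD (renderGroup ts (tripKey t)) 2
        (PySem.List.pyGetD (renderGroup ts (tripKey t)) 2 "" ++ " and " ++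
          PySem.List.pyGetD t 2 "") := by
  have hne := matches_ne_nil_of_mem ts (tripKey t) h
  unfold renderGroup
  rw [List.filter_append]
  have hft : List.filter (fun u => tripKey u == tripKey t) [t] = [t] := by simp
  rw [hft]
  obtain ⟨m, ms, hm⟩ := List.exists_cons_of_ne_nil hne
  rw [hm]
  have hjoin := join_and_snoc ((m :: ms).map (fun u => PySem.List.pyGetD u 2 ""))
      (by simp) (PySem.List.pyGetD t 2 "")
  simp only [List.cons_append, List.map_append, List.map_cons, List.map_nil,
    PySem.List.pyGetD_zero_cons, pySetD_lit, pyGetD_lit] at hjoin ⊢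
  rw [hjoin]

lemma renderGroup_snoc_fresh (ts : List (List String)) (t : List String)
    (h : tripKey t ∉ keysOf ts) :
    renderGroup (ts ++ [t]) (tripKey t) =
      [PySem.List.pyGetD t 0 "", PySem.List.pyGetD t 1 "", PySem.List.pyGetD t 2 ""] := by
  unfold renderGroup
  rw [List.filter_append, matches_nil_of_not_mem ts _ h]
  simp [join_and_singleton, PySem.List.pyGetD, PySem.List.pyGet?, PySem.List.pyIdx?]

-- find over B's rendered items list
lemma find?_map_self {g : String × String → List String} (K : List (String × String))
    (k : String × String) (h : k ∈ K) :
    (K.map (fun k' => (k', g k'))).find? (fun p => p.1 == k) = some (k, g k) := by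
  induction K with
  | nil => simp at h
  | cons a K ih =>
    by_cases hak : a = k
    · subst hak; simp
    · have : k ∈ K := by
        rcases List.mem_cons.mp h with h' | h'
        · exact absurd h'.symm hak
        · exact h'
      simp [hak, ih this]

-- the central invariant: A's dict after the whole fold IS B's keys list paired with B's rendered groups
lemma itemsA (ts : List (List String)) :
    (ts.foldl stepA PySem.Dict.empty).items =
      (keysOf ts).map (fun k => (k, renderGroup ts k)) := by
  induction ts using List.reverseRecOn with
  | nil => simp [keysOf, PySem.Dict.empty]
  | append_singleton ts t ih =>
    rw [List.foldl_append, List.foldl_cons, List.foldl_nil, keysOf_snoc]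
    set d := ts.foldl stepA PySem.Dict.empty with hd
    have hstep : stepA d t =
        if d.contains (tripKey t) then
          d.insert (tripKey t)
            (PySem.List.pySetD (d.getD (tripKey t) []) 2
              (PySem.List.pyGetD (d.getD (tripKey t) []) 2 "" ++ " and " ++
                PySem.List.pyGetD t 2 ""))
        else
          d.insert (tripKey t)
            [PySem.List.pyGetD t 0 "", PySem.List.pyGetD t 1 "", PySem.List.pyGetD t 2 ""] := rfl
    by_cases hmem : tripKey t ∈ keysOf ts
    · have hcd : d.contains (tripKey t) = true := by
        simp only [PySem.Dict.contains, ih, List.any_map, List.any_eq_true]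
        exact ⟨tripKey t, hmem, by simp⟩
      have hck : (keysOf ts).contains (tripKey t) = true := by
        simpa [List.contains_iff_mem] using hmem
      rw [hstep, if_pos hcd]
      unfold keysStep
      rw [if_pos hck]
      have hget : d.get? (tripKey t) = some (renderGroup ts (tripKey t)) := by
        simp only [PySem.Dict.get?, ih, find?_map_self _ _ hmem, Option.map_some]
      have hgetD : d.getD (tripKey t) [] = renderGroup ts (tripKey t) := by
        simp [PySem.Dict.getD, hget]
      rw [PySem.Dict.items_insert_of_contains _ _ hcd, ih, hgetD, List.map_map]
      apply List.map_congr_left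
      intro k' hk'
      by_cases hkk : k' = tripKey t
      · subst hkk
        simp [Function.comp, renderGroup_snoc_eq ts t hmem]
      · have hb : (k' == tripKey t) = false := beq_false_of_ne hkk
        simp [Function.comp, hb, renderGroup_snoc_ne ts t k' (fun he => hkk he.symm)]
    · have hcd : d.contains (tripKey t) = false := by
        simp only [PySem.Dict.contains, ih, List.any_map, List.any_eq_false]
        intro k' hk'
        simp only [Function.comp]
        exact fun h => hmem ((eq_of_beq h) ▸ hk')
      have hck : (keysOf ts).contains (tripKey t) = false := by
        simpa [List.contains_iff_mem] using hmem
      rw [hstep, if_neg (by simp [hcd])]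
      unfold keysStep
      rw [if_neg (by simpa [List.contains_iff_mem] using hmem)]
      rw [PySem.Dict.items_insert_of_not_contains _ _ hcd, ih, List.map_append]
      congr 1
      · apply List.map_congr_left
        intro k' hk'
        have hne : tripKey t ≠ k' := fun he => hmem (he ▸ hk')
        rw [renderGroup_snoc_ne ts t k' hne]
      · simp [renderGroup_snoc_fresh ts t hmem]

-- ===== VERDICT (by name: the statement is the Claim_ definition above) =====
theorem merge_similar_triplets_spec : Claim_equal_merge_similar_triplets := by
  intro ts _ _
  unfold Spec_merge_similar_triplets merge_similar_triplets merge_similar_triplets_alt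
  simp [PySem.Dict.values, itemsA ts, List.map_map, Function.comp]
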